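-- pv_equiv track=rewrite | github.com/poulmich/Cryptography-Algorithms-Implementation | RC4.py | String2Binary
-- ===== SOURCE A (Python) =====
-- def String2Binary(message):
--     message = message.upper()
--     converted: str = ""
--     for letter in message:
--         if letter =='A':
--             converted+="00000"
--         elif letter == 'B':
--             converted+="00001"
--         elif letter =='C':
--             converted+='00010'
--         elif letter=='D':
--             converted+= '00011'
--         elif letter=='E':
--             converted+='00100'
--         elif letter =='F':
--             converted+='00101'
--         elif letter =='G':
--             converted+= '00110'
--         elif letter == 'H':
--             converted+='00111'
--         elif letter =='I':
--             converted+='01000'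
--         elif letter =='J':
--             converted+='01001'
--         elif letter=='K':
--              converted+='01010'
--         elif letter=='L':
--             converted+='01011'
--         elif letter=='M':
--             converted+='01100'
--         elif letter=='N':
--             converted+='01101'
--         elif letter =='O':
--             converted+='01110'
--         elif letter =='P':
--             converted+='01111'
--         elif letter =='Q':
--             converted+='10000'
--         elif letter =='R':
--             converted+='10001'
--         elif letter =='S':
--             converted+='10010'
--         elif letter =='T':
--             converted+= '10011'
--         elif letter =='U':
--             converted+='10100'
--         elif letter =='V':
--             converted+='10101'
--         elif letter =='W':
--             converted+='10110'
--         elif letter =='X':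
--             converted+='10111'
--         elif letter =='Y':
--             converted+='11000'
--         elif letter == 'Z':
--             converted+='11001'
--         elif letter=='.':
--             converted+='11010'
--         elif letter=='!':
--             converted+='11011'
--         elif letter=='?':
--             converted+='11100'
--         elif letter=='(':
--             converted+='11101'
--         elif letter == ')':
--             converted+='11110'
--         elif letter=='-':
--             converted+='11111'
--         else:
--             continue
--     return converted
-- ===== SOURCE B (Python) =====
-- ALPHABET = "ABCDEFGHIJKLMNOPQRSTUVWXYZ.!?()-"
-- BASE32 = "0123456789abcdefghijklmnopqrstuv"
--
--
-- def String2Binary(message):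
--     s = "".join(BASE32[ALPHABET.index(c)] for c in message.upper() if c in ALPHABET)
--     if not s:
--         return ""
--     return format(int(s, 32), "0{}b".format(5 * len(s)))
-- ===== Notes on version B (the rewrite author's own statement) =====
-- stated objective: alternative
-- what changed: Instead of appending a 5-bit code string per character through a 32-branch elif chain, B transcodes each kept character's alphabet index to a base-32 digit character, parses the whole digit string once with int(s, 32) into a single big integer, and renders it once as a zero-padded binary numeral of width 5*count.
import Mathlib
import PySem

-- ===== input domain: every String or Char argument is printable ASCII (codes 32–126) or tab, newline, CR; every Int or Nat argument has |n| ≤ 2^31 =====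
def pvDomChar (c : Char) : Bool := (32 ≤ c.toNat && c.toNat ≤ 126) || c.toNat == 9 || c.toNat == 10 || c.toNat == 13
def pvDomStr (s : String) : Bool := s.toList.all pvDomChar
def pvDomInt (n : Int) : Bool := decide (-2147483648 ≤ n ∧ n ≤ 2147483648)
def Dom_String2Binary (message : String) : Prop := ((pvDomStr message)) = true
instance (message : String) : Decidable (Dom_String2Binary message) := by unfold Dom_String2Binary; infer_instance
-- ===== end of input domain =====

-- B replaces A's 32-branch per-character append chain by a different algorithm: it transcodes the
-- kept characters' alphabet indices into a base-32 numeral string, parses it once into one big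
-- integer, and renders that integer once as a zero-padded binary numeral (objective: alternative);
-- return values proved equal on Dom.
-- ===== PORT A =====
def String2Binary (message : String) : String :=
  let m := PySem.Str.upper message
  m.toList.foldl (fun converted letter =>
    if letter = 'A' then converted ++ "00000"
    else if letter = 'B' then converted ++ "00001"
    else if letter = 'C' then converted ++ "00010"
    else if letter = 'D' then converted ++ "00011"
    else if letter = 'E' then converted ++ "00100"
    else if letter = 'F' then converted ++ "00101"
    else if letter = 'G' then converted ++ "00110"
    else if letter = 'H' then converted ++ "00111"
    else if letter = 'I' then converted ++ "01000"
    else if letter = 'J' then converted ++ "01001"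
    else if letter = 'K' then converted ++ "01010"
    else if letter = 'L' then converted ++ "01011"
    else if letter = 'M' then converted ++ "01100"
    else if letter = 'N' then converted ++ "01101"
    else if letter = 'O' then converted ++ "01110"
    else if letter = 'P' then converted ++ "01111"
    else if letter = 'Q' then converted ++ "10000"
    else if letter = 'R' then converted ++ "10001"
    else if letter = 'S' then converted ++ "10010"
    else if letter = 'T' then converted ++ "10011"
    else if letter = 'U' then converted ++ "10100"
    else if letter = 'V' then converted ++ "10101"
    else if letter = 'W' then converted ++ "10110"
    else if letter = 'X' then converted ++ "10111"
    else if letter = 'Y' then converted ++ "11000"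
    else if letter = 'Z' then converted ++ "11001"
    else if letter = '.' then converted ++ "11010"
    else if letter = '!' then converted ++ "11011"
    else if letter = '?' then converted ++ "11100"
    else if letter = '(' then converted ++ "11101"
    else if letter = ')' then converted ++ "11110"
    else if letter = '-' then converted ++ "11111"
    else converted) ""

-- ===== PORT B =====
def pvAlphabet : String := "ABCDEFGHIJKLMNOPQRSTUVWXYZ.!?()-"

-- port of format(n, '0{w}b'): w characters, MSB first; exact for n < 2^w, the only values Source B feeds it
def pvPad (w n : Nat) : String :=
  String.ofList ((List.range w).map (fun k => if n / 2 ^ (w - 1 - k) % 2 = 1 then '1' else '0'))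

def pvBase32 : String := "0123456789abcdefghijklmnopqrstuv"

-- port of int(s, 32) for a string of base-32 digit characters (the only strings Source B feeds it):
-- digit value = position in pvBase32, accumulated left to right
def pvDigitVal (c : Char) : Nat := pvBase32.toList.idxOf c

def String2Binary_alt (message : String) : String :=
  -- 'BASE32[ALPHABET.index(c)] for c in … if c in ALPHABET' ported as idxOf? (index when present,
  -- skip otherwise) then getD (exact: the index is always < 32)
  let s := (PySem.Str.upper message).toList.filterMap
    (fun c => (pvAlphabet.toList.idxOf? c).map (fun i => pvBase32.toList.getD i '0'))
  if s = [] then ""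
  else pvPad (5 * s.length) (s.foldl (fun a c => a * 32 + pvDigitVal c) 0)

-- ===== PRECONDITION & SPEC =====
def Spec_String2Binary (message : String) (out : String) : Prop := out = String2Binary_alt message
instance (message : String) (out : String) : Decidable (Spec_String2Binary message out) := by unfold Spec_String2Binary; infer_instance

-- ===== CLAIM (what is proved, stated in full; the proofs are below) =====
def Claim_equal_String2Binary : Prop := ∀ (message : String), Dom_String2Binary message → Spec_String2Binary message (String2Binary message)

-- ===== LEMMAS AND PROOFS =====
set_option maxRecDepth 8000
set_option maxHeartbeats 2000000

-- A's per-character contribution, extracted as a function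
def pvCodeA (c : Char) : String :=
  if c = 'A' then "00000"
  else if c = 'B' then "00001"
  else if c = 'C' then "00010"
  else if c = 'D' then "00011"
  else if c = 'E' then "00100"
  else if c = 'F' then "00101"
  else if c = 'G' then "00110"
  else if c = 'H' then "00111"
  else if c = 'I' then "01000"
  else if c = 'J' then "01001"
  else if c = 'K' then "01010"
  else if c = 'L' then "01011"
  else if c = 'M' then "01100"
  else if c = 'N' then "01101"
  else if c = 'O' then "01110"
  else if c = 'P' then "01111"
  else if c = 'Q' then "10000"
  else if c = 'R' then "10001"
  else if c = 'S' then "10010"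
  else if c = 'T' then "10011"
  else if c = 'U' then "10100"
  else if c = 'V' then "10101"
  else if c = 'W' then "10110"
  else if c = 'X' then "10111"
  else if c = 'Y' then "11000"
  else if c = 'Z' then "11001"
  else if c = '.' then "11010"
  else if c = '!' then "11011"
  else if c = '?' then "11100"
  else if c = '(' then "11101"
  else if c = ')' then "11110"
  else if c = '-' then "11111"
  else ""

-- B's per-character contribution, extracted as a function
def pvCodeB (c : Char) : Option String :=
  (pvAlphabet.toList.idxOf? c).map (pvPad 5)

lemma pvStepA_eq :
    (fun (converted : String) (letter : Char) =>
      if letter = 'A' then converted ++ "00000"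
      else if letter = 'B' then converted ++ "00001"
      else if letter = 'C' then converted ++ "00010"
      else if letter = 'D' then converted ++ "00011"
      else if letter = 'E' then converted ++ "00100"
      else if letter = 'F' then converted ++ "00101"
      else if letter = 'G' then converted ++ "00110"
      else if letter = 'H' then converted ++ "00111"
      else if letter = 'I' then converted ++ "01000"
      else if letter = 'J' then converted ++ "01001"
      else if letter = 'K' then converted ++ "01010"
      else if letter = 'L' then converted ++ "01011"
      else if letter = 'M' then converted ++ "01100"
      else if letter = 'N' then converted ++ "01101"
      else if letter = 'O' then converted ++ "01110"
      else if letter = 'P' then converted ++ "01111"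
      else if letter = 'Q' then converted ++ "10000"
      else if letter = 'R' then converted ++ "10001"
      else if letter = 'S' then converted ++ "10010"
      else if letter = 'T' then converted ++ "10011"
      else if letter = 'U' then converted ++ "10100"
      else if letter = 'V' then converted ++ "10101"
      else if letter = 'W' then converted ++ "10110"
      else if letter = 'X' then converted ++ "10111"
      else if letter = 'Y' then converted ++ "11000"
      else if letter = 'Z' then converted ++ "11001"
      else if letter = '.' then converted ++ "11010"
      else if letter = '!' then converted ++ "11011"
      else if letter = '?' then converted ++ "11100"
      else if letter = '(' then converted ++ "11101"
      else if letter = ')' then converted ++ "11110"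
      else if letter = '-' then converted ++ "11111"
      else converted) = (fun acc c => acc ++ pvCodeA c) := by
  funext acc c
  unfold pvCodeA
  simp only [apply_ite (fun s => acc ++ s), String.append_empty]

lemma pvFoldl_append (l : List String) (s : String) :
    l.foldl (· ++ ·) s = s ++ String.join l := by
  induction l generalizing s with
  | nil => simp [String.join]
  | cons a t ih =>
    simp only [List.foldl_cons, String.join, List.foldl_cons]
    rw [ih, ih ("" ++ a)]
    simp [String.append_assoc]

lemma pvJoin_snoc (xs : List String) (y : String) :
    String.join (xs ++ [y]) = String.join xs ++ y := by
  simp only [String.join, List.foldl_append, List.foldl_cons, List.foldl_nil]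

lemma pvJoin_cons (a : String) (t : List String) :
    String.join (a :: t) = a ++ String.join t := by
  simp only [String.join, List.foldl_cons]
  rw [pvFoldl_append t ("" ++ a)]
  simp [String.join]

lemma pvKey : ∀ n : Nat, n < 127 →
    pvCodeA (Char.ofNat n) = (pvCodeB (Char.ofNat n)).getD "" := by decide

lemma pvUpperLt : ∀ n : Nat, n < 127 → (PySem.Chars.upperChar (Char.ofNat n)).toNat < 127 := by
  decide

lemma pvJoin_filterMap (l : List Char) (h : ∀ c ∈ l, c.toNat < 127) :
    String.join (l.map pvCodeA) = String.join (l.filterMap pvCodeB) := by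
  induction l with
  | nil => rfl
  | cons c t ih =>
    have hc := pvKey c.toNat (h c (by simp))
    rw [Char.ofNat_toNat] at hc
    have ht := ih (fun x hx => h x (by simp [hx]))
    cases hb : pvCodeB c with
    | none =>
      rw [List.map_cons, List.filterMap_cons, hb, pvJoin_cons, ht, hc, hb]
      simp
    | some s =>
      rw [List.map_cons, List.filterMap_cons, hb, pvJoin_cons, pvJoin_cons, ht, hc, hb]
      simp

lemma pvDivHigh (n d e : Nat) (hd : d < 32) : (n * 32 + d) / 2 ^ (e + 5) = n / 2 ^ e := by
  have h1 : (2 : Nat) ^ (e + 5) = 32 * 2 ^ e := by rw [pow_add]; ring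
  rw [h1, ← Nat.div_div_eq_div_mul]
  congr 1
  omega

lemma pvDivLow (n d e : Nat) (he : e < 5) : (n * 32 + d) / 2 ^ e % 2 = d / 2 ^ e % 2 := by
  interval_cases e <;> omega

lemma pvPad_split (k n d : Nat) (hd : d < 32) :
    pvPad (5 * k + 5) (n * 32 + d) = pvPad (5 * k) n ++ pvPad 5 d := by
  unfold pvPad
  rw [← String.ofList_append, String.ofList_inj]
  rw [List.range_add, List.map_append, List.map_map]
  congr 1
  · apply List.map_congr_left
    intro j hj
    have hj' : j < 5 * k := List.mem_range.mp hj
    have he : 5 * k + 5 - 1 - j = (5 * k - 1 - j) + 5 := by omega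
    rw [he, pvDivHigh n d _ hd]
  · apply List.map_congr_left
    intro j hj
    have hj' : j < 5 := List.mem_range.mp hj
    have he1 : 5 * k + 5 - 1 - (5 * k + j) = 4 - j := by omega
    have he2 : 5 - 1 - j = 4 - j := by omega
    simp only [Function.comp_apply, he1, he2]
    rw [pvDivLow n d _ (by omega)]

lemma pvJoin_digits (l : List Nat) (h : ∀ d ∈ l, d < 32) :
    String.join (l.map (pvPad 5)) =
      if l = [] then "" else pvPad (5 * l.length) (l.foldl (fun a d => a * 32 + d) 0) := by
  induction l using List.reverseRecOn with
  | nil => rfl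
  | append_singleton t d ih =>
    have hd : d < 32 := h d (by simp)
    rw [List.map_append, List.map_cons, List.map_nil, pvJoin_snoc,
        ih (fun x hx => h x (by simp [hx]))]
    by_cases ht : t = []
    · subst ht
      simp [pvPad]
    · rw [if_neg ht, if_neg (by simp)]
      have hlen : 5 * (t ++ [d]).length = 5 * t.length + 5 := by simp; ring
      rw [hlen, List.foldl_append, List.foldl_cons, List.foldl_nil,
          pvPad_split t.length _ d hd]

lemma pvEncVal : ∀ d : Nat, d < 32 →
    pvDigitVal (pvBase32.toList.getD d '0') = d := by decide

lemma pvFoldl_enc (l : List Nat) (h : ∀ d ∈ l, d < 32) (a : Nat) :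
    (l.map (fun i => pvBase32.toList.getD i '0')).foldl (fun a c => a * 32 + pvDigitVal c) a =
      l.foldl (fun a d => a * 32 + d) a := by
  induction l generalizing a with
  | nil => rfl
  | cons d t ih =>
    simp only [List.map_cons, List.foldl_cons]
    rw [pvEncVal d (h d (by simp))]
    exact ih (fun x hx => h x (by simp [hx])) _

-- ===== VERDICT (by name: the statement is the Claim_ definition above) =====
theorem String2Binary_spec : Claim_equal_String2Binary := by
  intro message hdom
  unfold Spec_String2Binary String2Binary String2Binary_alt
  simp only [pvStepA_eq]
  rw [← List.foldl_map, pvFoldl_append]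
  have hlt : ∀ c ∈ (PySem.Str.upper message).toList, c.toNat < 127 := by
    intro c hcmem
    rw [PySem.Str.toList_upper] at hcmem
    unfold PySem.Chars.upper at hcmem
    obtain ⟨x, hx, rfl⟩ := List.mem_map.mp hcmem
    have hdx : pvDomChar x = true := by
      have := hdom
      unfold Dom_String2Binary pvDomStr at this
      exact (List.all_eq_true.mp this) x hx
    have hx127 : x.toNat < 127 := by
      simp [pvDomChar] at hdx
      omega
    have := pvUpperLt x.toNat hx127
    rwa [Char.ofNat_toNat] at this
  rw [pvJoin_filterMap _ hlt]
  have hcb : pvCodeB = fun c => (pvAlphabet.toList.idxOf? c).map (pvPad 5) := rfl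
  have hbound : ∀ x ∈ (PySem.Str.upper message).toList.filterMap
      (fun c => pvAlphabet.toList.idxOf? c), x < 32 := by
    intro x hx
    obtain ⟨c, -, hc⟩ := List.mem_filterMap.mp hx
    obtain ⟨h1, -, -⟩ := List.idxOf?_eq_some_iff.mp hc
    have h32 : pvAlphabet.toList.length = 32 := by decide
    omega
  rw [hcb, ← List.map_filterMap, pvJoin_digits _ hbound]
  have hs : (PySem.Str.upper message).toList.filterMap
      (fun c => (pvAlphabet.toList.idxOf? c).map (fun i => pvBase32.toList.getD i '0')) =
      ((PySem.Str.upper message).toList.filterMap (fun c => pvAlphabet.toList.idxOf? c)).map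
        (fun i => pvBase32.toList.getD i '0') := (List.map_filterMap).symm
  rw [hs, pvFoldl_enc _ hbound, List.length_map]
  have hnil : ((PySem.Str.upper message).toList.filterMap
      (fun c => pvAlphabet.toList.idxOf? c)).map (fun i => pvBase32.toList.getD i '0') = [] ↔
      (PySem.Str.upper message).toList.filterMap (fun c => pvAlphabet.toList.idxOf? c) = [] := by
    simp
  by_cases hE : (PySem.Str.upper message).toList.filterMap
      (fun c => pvAlphabet.toList.idxOf? c) = []
  · rw [if_pos hE, if_pos (hnil.mpr hE)]
    simp
  · rw [if_neg hE, if_neg (fun hq => hE (hnil.mp hq))]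
    simp
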